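-- pv_equiv track=rewrite | github.com/mrs-kaktus/advent_of_code | 2025/2025_12_06.py | read_number_in_column
-- ===== SOURCE A (Python) =====
-- def read_number_in_column(numbers_str):
--     numbers = []
--     temp_list_of_numbers = []
--     for n1, n2, n3, n4 in zip(numbers_str[0], numbers_str[1], numbers_str[2], numbers_str[3]):
--         if (n1 + n2 + n3 + n4).strip().isdigit():
--             temp_list_of_numbers.append(int(n1 + n2 + n3 + n4))
--         else:
--             numbers.append(temp_list_of_numbers)
--             temp_list_of_numbers = []
--     return numbers
-- ===== SOURCE B (Python) =====
-- def read_number_in_column(numbers_str):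
--     cols = [n1 + n2 + n3 + n4 for n1, n2, n3, n4 in
--             zip(numbers_str[0], numbers_str[1], numbers_str[2], numbers_str[3])]
--     seps = [i for i, t in enumerate(cols) if not t.strip().isdigit()]
--     numbers = []
--     start = 0
--     for s in seps:
--         numbers.append([int(cols[i]) for i in range(start, s)])
--         start = s + 1
--     return numbers
-- ===== Notes on version B (the rewrite author's own statement) =====
-- stated objective: alternative
-- what changed: B first materialises the column tokens, finds the separator column indices with enumerate+filter, and then slices out the digit runs between consecutive separators by index ranges, instead of A's single pass with a running accumulator list.
import Mathlib
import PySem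

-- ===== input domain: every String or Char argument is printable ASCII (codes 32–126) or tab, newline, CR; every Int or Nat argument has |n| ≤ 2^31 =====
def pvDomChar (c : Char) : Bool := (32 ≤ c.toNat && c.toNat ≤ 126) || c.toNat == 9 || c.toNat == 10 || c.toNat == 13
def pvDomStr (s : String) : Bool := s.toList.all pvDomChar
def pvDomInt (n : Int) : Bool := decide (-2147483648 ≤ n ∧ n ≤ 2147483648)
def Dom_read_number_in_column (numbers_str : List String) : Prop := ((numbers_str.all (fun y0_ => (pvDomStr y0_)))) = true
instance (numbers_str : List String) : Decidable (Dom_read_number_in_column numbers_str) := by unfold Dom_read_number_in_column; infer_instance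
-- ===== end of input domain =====

-- B reads the same vertically-aligned numbers by materialising the column tokens, finding the
-- separator indices, and slicing the digit runs between consecutive separators (alternative
-- decomposition, same cost); A folds one running accumulator over the zipped columns.

-- ===== PORT A =====
-- the for-loop over zip(numbers_str[0..3]) with accumulators `numbers`, `temp_list_of_numbers`
def pvLoopA : List Char → List Char → List Char → List Char → List (List Int) → List Int → List (List Int)
  | a :: as, b :: bs, c :: cs, d :: ds, numbers, temp =>
      if PySem.Chars.strIsdigit (PySem.Chars.strip [a, b, c, d]) then
        pvLoopA as bs cs ds numbers (temp ++ [(PySem.Int.ofChars? [a, b, c, d]).getD 0])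
      else
        pvLoopA as bs cs ds (numbers ++ [temp]) []
  | _, _, _, _, numbers, _ => numbers

def read_number_in_column (numbers_str : List String) : List (List Int) :=
  match PySem.List.pyGet? numbers_str 0, PySem.List.pyGet? numbers_str 1,
        PySem.List.pyGet? numbers_str 2, PySem.List.pyGet? numbers_str 3 with
  | some r0, some r1, some r2, some r3 => pvLoopA r0.toList r1.toList r2.toList r3.toList [] []
  | _, _, _, _ => []   -- IndexError in Python: excluded by Pre_

-- ===== PORT B =====
-- cols = [n1+n2+n3+n4 for … in zip(…)]
def pvTok4 (as bs cs ds : List Char) : List (List Char) :=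
  (as.zip (bs.zip (cs.zip ds))).map (fun p => [p.1, p.2.1, p.2.2.1, p.2.2.2])

-- int(cols[i])  (never a ValueError here: every sliced token passed strip().isdigit())
def pvVal (t : List Char) : Int := (PySem.Int.ofChars? t).getD 0

-- the for-loop over seps with accumulator `start`
def pvGaps : List Int → Int → List (List Char) → List (List Int)
  | [], _, _ => []
  | s :: rest, start, cols =>
      ((PySem.List.pyRange start s 1).map (fun i => pvVal (PySem.List.pyGetD cols i []))) ::
        pvGaps rest (s + 1) cols

def read_number_in_column_alt (numbers_str : List String) : List (List Int) :=
  -- IndexError in Python on any missing row: excluded by Pre_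
  match PySem.List.pyGet? numbers_str 0 with
  | none => []
  | some r0 =>
    match PySem.List.pyGet? numbers_str 1 with
    | none => []
    | some r1 =>
      match PySem.List.pyGet? numbers_str 2 with
      | none => []
      | some r2 =>
        match PySem.List.pyGet? numbers_str 3 with
        | none => []
        | some r3 =>
          let cols := pvTok4 r0.toList r1.toList r2.toList r3.toList
          let seps := ((PySem.List.enumerate cols 0).filter
                        (fun p => ! PySem.Chars.strIsdigit (PySem.Chars.strip p.2))).map (·.1)
          pvGaps seps 0 cols

-- ===== PRECONDITION & SPEC =====
-- Pre_ excludes exactly the inputs with fewer than 4 rows, on which Python A raises IndexError.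
def Pre_read_number_in_column (numbers_str : List String) : Prop := 4 ≤ numbers_str.length
instance (numbers_str : List String) : Decidable (Pre_read_number_in_column numbers_str) := by
  unfold Pre_read_number_in_column; infer_instance

def pvWitness_read_number_in_column : List String := ["1 2", "3 4", "5 6", "7 8"]

def Spec_read_number_in_column (numbers_str : List String) (out : List (List Int)) : Prop := out = read_number_in_column_alt numbers_str
instance (numbers_str : List String) (out : List (List Int)) : Decidable (Spec_read_number_in_column numbers_str out) := by unfold Spec_read_number_in_column; infer_instance

-- ===== CLAIM (what is proved, stated in full; the proofs are below) =====
def Claim_equal_read_number_in_column : Prop := ∀ (numbers_str : List String), Dom_read_number_in_column numbers_str → Pre_read_number_in_column numbers_str → Spec_read_number_in_column numbers_str (read_number_in_column numbers_str)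

-- ===== LEMMAS AND PROOFS =====

-- common reference function: fold the token list with a running accumulator, dropping the tail run
def pvSpecGo : List (List Char) → List Int → List (List Int)
  | [], _ => []
  | t :: ts, temp =>
      if PySem.Chars.strIsdigit (PySem.Chars.strip t) then pvSpecGo ts (temp ++ [pvVal t])
      else temp :: pvSpecGo ts []

-- separator indices of the token list, starting at absolute index k
def pvSeps : Int → List (List Char) → List Int
  | _, [] => []
  | k, t :: ts =>
      if PySem.Chars.strIsdigit (PySem.Chars.strip t) then pvSeps (k + 1) ts
      else k :: pvSeps (k + 1) ts

-- prepend temp to the head run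
def pvWithTemp (temp : List Int) : List (List Int) → List (List Int)
  | [] => []
  | h :: t => (temp ++ h) :: t

theorem pvWithTemp_nil (l : List (List Int)) : pvWithTemp [] l = l := by
  cases l <;> simp [pvWithTemp]

theorem pvLoopA_spec (as bs cs ds : List Char) (numbers : List (List Int)) (temp : List Int) :
    pvLoopA as bs cs ds numbers temp = numbers ++ pvSpecGo (pvTok4 as bs cs ds) temp := by
  induction as generalizing bs cs ds numbers temp with
  | nil => simp [pvLoopA, pvTok4, pvSpecGo]
  | cons a as ih =>
    cases bs with
    | nil => simp [pvLoopA, pvTok4, pvSpecGo]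
    | cons b bs =>
      cases cs with
      | nil => simp [pvLoopA, pvTok4, pvSpecGo]
      | cons c cs =>
        cases ds with
        | nil => simp [pvLoopA, pvTok4, pvSpecGo]
        | cons d ds =>
          by_cases h : PySem.Chars.strIsdigit (PySem.Chars.strip [a, b, c, d]) = true
          · simp [pvLoopA, pvTok4, pvSpecGo, pvVal, h, ih]
          · simp [pvLoopA, pvTok4, pvSpecGo, h, ih]

theorem pvSeps_of_enumerate (cols : List (List Char)) (k : Int) :
    ((PySem.List.enumerate cols k).filter
        (fun p => ! PySem.Chars.strIsdigit (PySem.Chars.strip p.2))).map (·.1)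
      = pvSeps k cols := by
  induction cols generalizing k with
  | nil => simp [PySem.List.enumerate_nil, pvSeps]
  | cons t ts ih =>
    rw [PySem.List.enumerate_cons]
    by_cases h : PySem.Chars.strIsdigit (PySem.Chars.strip t) = true
    · simp [pvSeps, h, ih]
    · simp [pvSeps, h, ih]

theorem pvSeps_ge (cols : List (List Char)) (k s : Int) (hs : s ∈ pvSeps k cols) : k ≤ s := by
  induction cols generalizing k with
  | nil => simp [pvSeps] at hs
  | cons t ts ih =>
    unfold pvSeps at hs
    split at hs
    · have := ih (k + 1) hs; omega
    · rcases List.mem_cons.mp hs with h | h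
      · omega
      · have := ih (k + 1) h; omega

theorem pvGaps_shift (L : List Int) (k : Nat) (full : List (List Char)) (t : List Char)
    (temp : List Int) (hget : full[k]? = some t) (hge : ∀ s ∈ L, (k : Int) + 1 ≤ s) :
    pvWithTemp (temp ++ [pvVal t]) (pvGaps L ((k : Int) + 1) full)
      = pvWithTemp temp (pvGaps L (k : Int) full) := by
  cases L with
  | nil => simp [pvGaps, pvWithTemp]
  | cons s rest =>
    have hks : (k : Int) < s := by have := hge s (by simp); omega
    have hrange : PySem.List.pyRange (k : Int) s 1 = (k : Int) :: PySem.List.pyRange ((k : Int) + 1) s 1 :=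
      PySem.List.pyRange_one_cons hks
    have hgetD : PySem.List.pyGetD full (k : Int) [] = t := by
      simp [List.getD, hget]
    simp [pvGaps, pvWithTemp, hrange, hgetD]

theorem pvGaps_spec (suffix : List (List Char)) (k : Nat) (full : List (List Char))
    (temp : List Int) (hdrop : full.drop k = suffix) :
    pvSpecGo suffix temp = pvWithTemp temp (pvGaps (pvSeps (k : Int) suffix) (k : Int) full) := by
  induction suffix generalizing k temp with
  | nil => simp [pvSpecGo, pvSeps, pvGaps, pvWithTemp]
  | cons t ts ih =>
    have hget : full[k]? = some t := by
      have h0 : (full.drop k)[0]? = some t := by simp [hdrop]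
      rw [List.getElem?_drop] at h0
      simpa using h0
    have hdrop' : full.drop (k + 1) = ts := by
      have h2 := congrArg (List.drop 1) hdrop
      simp [List.drop_drop] at h2
      simpa [Nat.add_comm] using h2
    have hcast : ((k + 1 : Nat) : Int) = (k : Int) + 1 := by push_cast; ring
    by_cases h : PySem.Chars.strIsdigit (PySem.Chars.strip t) = true
    · have hstep : pvSpecGo (t :: ts) temp = pvSpecGo ts (temp ++ [pvVal t]) := by
        simp [pvSpecGo, h]
      have ih' := ih (k + 1) (temp ++ [pvVal t]) hdrop'
      rw [hcast] at ih'
      have hseps : pvSeps (k : Int) (t :: ts) = pvSeps ((k : Int) + 1) ts := by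
        simp [pvSeps, h]
      rw [hstep, ih', hseps]
      exact pvGaps_shift _ k full t temp hget (fun s hs => pvSeps_ge ts _ s hs)
    · have hseps : pvSeps (k : Int) (t :: ts) = (k : Int) :: pvSeps ((k : Int) + 1) ts := by
        simp [pvSeps, h]
      have ihnil := ih (k + 1) [] hdrop'
      rw [hcast, pvWithTemp_nil] at ihnil
      have hempty : PySem.List.pyRange (k : Int) (k : Int) 1 = [] := by
        simp
      simp [pvSpecGo, h, hseps, pvGaps, pvWithTemp, hempty, ihnil]

-- ===== VERDICT (by name: the statement is the Claim_ definition above) =====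
theorem read_number_in_column_spec : Claim_equal_read_number_in_column := by
  intro ns _hdom hpre
  unfold Pre_read_number_in_column at hpre
  unfold Spec_read_number_in_column read_number_in_column read_number_in_column_alt
  rcases ns with _ | ⟨r0, ns⟩
  · simp at hpre
  rcases ns with _ | ⟨r1, ns⟩
  · simp at hpre
  rcases ns with _ | ⟨r2, ns⟩
  · simp at hpre
  rcases ns with _ | ⟨r3, ns⟩
  · simp at hpre
  have e0 : PySem.List.pyGet? (r0 :: r1 :: r2 :: r3 :: ns) (0 : Int) = some r0 := by
    simp [PySem.List.pyGet?_of_nonneg]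
  have e1 : PySem.List.pyGet? (r0 :: r1 :: r2 :: r3 :: ns) (1 : Int) = some r1 := by
    simp [PySem.List.pyGet?_of_nonneg]
  have e2 : PySem.List.pyGet? (r0 :: r1 :: r2 :: r3 :: ns) (2 : Int) = some r2 := by
    simp [PySem.List.pyGet?_of_nonneg]
  have e3 : PySem.List.pyGet? (r0 :: r1 :: r2 :: r3 :: ns) (3 : Int) = some r3 := by
    simp [PySem.List.pyGet?_of_nonneg]
  simp only [e0, e1, e2, e3]
  rw [pvLoopA_spec, pvSeps_of_enumerate]
  have hg := pvGaps_spec (pvTok4 r0.toList r1.toList r2.toList r3.toList) 0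
      (pvTok4 r0.toList r1.toList r2.toList r3.toList) [] (by simp)
  rw [pvWithTemp_nil] at hg
  simpa using hg
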